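-- pv_equiv track=rewrite | github.com/dlanghorne0428/Ballroom | Song.py | build_menu_entry
-- ===== SOURCE A (Python) =====
-- def build_menu_entry(index, filename):
--     """ Create a menu entry given an index number and a full pathname."""
--     done = False
--     #strip off the folder names
--     while not done:
--         pos = filename.find("/")
--         if pos == -1:
--             done = True
--         else:
--             filename = filename[pos+1:]
--
--     # strip off the extension
--     pos = filename.find(".")
--     if pos != -1:
--         filename = filename[:pos]
--
--     entry = str(index) + ". " + filename
--     return entry
-- ===== SOURCE B (Python) =====
-- def build_menu_entry(index, filename):
--     """Create a menu entry given an index number and a full pathname.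
--
--     Single left-to-right pass: a '/' resets the collected name, a '.'
--     stops collection until the next '/'; no repeated find-and-reslice.
--     """
--     name = ''
--     seen_dot = False
--     for ch in filename:
--         if ch == '/':
--             name = ''
--             seen_dot = False
--         elif ch == '.':
--             seen_dot = True
--         elif not seen_dot:
--             name += ch
--     return str(index) + '. ' + name
-- ===== Notes on version B (the rewrite author's own statement) =====
-- stated objective: simpler
-- what changed: Replaced A's repeated find('/')-and-reslice while loop plus a second find('.')/slice pass by one left-to-right scan over the characters that resets the name on '/' and stops collecting after a '.', so the string is traversed once with no re-slicing.
import Mathlib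
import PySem

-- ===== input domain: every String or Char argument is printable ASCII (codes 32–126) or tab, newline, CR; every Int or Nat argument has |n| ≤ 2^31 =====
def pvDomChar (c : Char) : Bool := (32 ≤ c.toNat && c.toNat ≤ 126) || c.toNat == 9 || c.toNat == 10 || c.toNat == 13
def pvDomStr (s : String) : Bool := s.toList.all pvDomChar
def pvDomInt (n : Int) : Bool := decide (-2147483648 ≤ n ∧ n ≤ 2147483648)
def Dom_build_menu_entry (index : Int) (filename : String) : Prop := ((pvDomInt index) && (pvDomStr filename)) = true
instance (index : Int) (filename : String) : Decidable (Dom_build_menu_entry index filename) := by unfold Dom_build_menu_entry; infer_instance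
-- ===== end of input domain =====

-- B replaces A's repeated find('/')-and-reslice while loop (plus a second find('.')/slice
-- pass) by one left-to-right scan over the characters; objective: simpler.

-- ===== PORT A =====
-- A's while loop: repeatedly find the first '/' and keep everything after it.
-- Ported on code points (List Char), exact for Python str semantics.
def pvStripFoldersA (l : List Char) : List Char :=
  let pos := PySem.Chars.find l ['/']
  if h : pos = -1 then l
  else
    have hlt : (PySem.List.slice l (some (pos + 1)) none).length < l.length := by
      have h0 : -1 ≤ pos := PySem.Chars.neg_one_le_find l ['/']
      have hne : l ≠ [] := by
        rintro rfl
        rcases (PySem.Chars.find_ne_neg_one_iff [] ['/']).mp h with ⟨s, t, hst⟩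
        simpa using congrArg List.length hst
      rw [PySem.List.slice_from l (by omega : (0:Int) ≤ pos + 1)]
      have hp : 0 < l.length := List.length_pos_iff.mpr hne
      simp only [List.length_drop]
      omega
    pvStripFoldersA (PySem.List.slice l (some (pos + 1)) none)
termination_by l.length

def build_menu_entry (index : Int) (filename : String) : String :=
  -- while not done: pos = filename.find("/");  filename = filename[pos+1:]
  let fl := pvStripFoldersA filename.toList
  -- pos = filename.find("."); if pos != -1: filename = filename[:pos]
  let pos := PySem.Chars.find fl ['.']
  let fl := if pos ≠ -1 then PySem.List.slice fl none (some pos) else fl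
  -- entry = str(index) + ". " + filename   (str concatenation = list append, exact)
  String.ofList ((PySem.Int.toStr index).toList ++ (". ").toList ++ fl)

-- ===== PORT B =====
-- B's loop body: '/' resets, '.' sets the flag, otherwise append unless flagged.
def pvStepB (st : List Char × Bool) (c : Char) : List Char × Bool :=
  if c = '/' then ([], false)
  else if c = '.' then (st.1, true)
  else if st.2 = false then (st.1 ++ [c], st.2)
  else st

def build_menu_entry_alt (index : Int) (filename : String) : String :=
  let st := filename.toList.foldl pvStepB ([], false)
  String.ofList ((PySem.Int.toStr index).toList ++ (". ").toList ++ st.1)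

-- ===== PRECONDITION & SPEC =====
def Spec_build_menu_entry (index : Int) (filename : String) (out : String) : Prop := out = build_menu_entry_alt index filename
instance (index : Int) (filename : String) (out : String) : Decidable (Spec_build_menu_entry index filename out) := by unfold Spec_build_menu_entry; infer_instance

-- ===== CLAIM (what is proved, stated in full; the proofs are below) =====
def Claim_equal_build_menu_entry : Prop := ∀ (index : Int) (filename : String), Dom_build_menu_entry index filename → Spec_build_menu_entry index filename (build_menu_entry index filename)

-- ===== LEMMAS AND PROOFS =====

-- "keep characters other than c"
def pvNe (c x : Char) : Bool := x ≠ c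

-- the segment after the last '/'
def pvSeg (l : List Char) : List Char := (l.reverse.takeWhile (pvNe '/')).reverse

theorem pvSeg_nil : pvSeg [] = [] := by simp [pvSeg]

theorem pvSeg_append (l : List Char) (c : Char) :
    pvSeg (l ++ [c]) = if c = '/' then [] else pvSeg l ++ [c] := by
  unfold pvSeg
  rw [List.reverse_append]
  simp only [List.reverse_cons, List.reverse_nil, List.nil_append, List.singleton_append]
  by_cases h : c = '/'
  · rw [List.takeWhile_cons_of_neg (by simp [pvNe, h])]; simp [h]
  · rw [List.takeWhile_cons_of_pos (by simp [pvNe, h])]; simp [h]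

theorem pv_takeWhile_all {c : Char} {l : List Char} (h : c ∉ l) :
    l.takeWhile (pvNe c) = l := by
  apply List.takeWhile_eq_self_iff.mpr
  intro x hx
  simp [pvNe]
  rintro rfl; exact h hx

theorem pv_takeWhile_len_ne {c : Char} {l : List Char} (h : c ∈ l) :
    (l.takeWhile (pvNe c)).length ≠ l.length := by
  intro he
  have heq := (List.takeWhile_prefix (l := l) (pvNe c)).eq_of_length he
  have := List.takeWhile_eq_self_iff.mp heq c h
  simp [pvNe] at this

theorem pv_takeWhile_snoc {c : Char} (l : List Char) :
    (l ++ [c]).takeWhile (pvNe c) = l.takeWhile (pvNe c) := by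
  rw [List.takeWhile_append]
  split
  · next h =>
    have heq := (List.takeWhile_prefix (l := l) (pvNe c)).eq_of_length h
    simp [heq, pvNe]
  · rfl

theorem pv_takeWhile_mid {c : Char} (x y : List Char) :
    ((x ++ [c]) ++ y).takeWhile (pvNe c) = x.takeWhile (pvNe c) := by
  rw [List.takeWhile_append]
  split
  · next h =>
    exfalso
    rw [pv_takeWhile_snoc] at h
    have hle := (List.takeWhile_prefix (l := x) (pvNe c)).length_le
    simp at h
    omega
  · exact pv_takeWhile_snoc x

theorem pv_singleton_prefix {c : Char} {l : List Char} : ([c] <+: l) ↔ l.head? = some c := by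
  constructor
  · rintro ⟨t, rfl⟩; simp
  · intro h
    cases l with
    | nil => simp at h
    | cons x t =>
      simp at h
      exact ⟨t, by simp [h]⟩

theorem pv_find_neg {c : Char} {l : List Char} :
    PySem.Chars.find l [c] = -1 ↔ c ∉ l := by
  rw [PySem.Chars.find_eq_neg_one_iff]
  constructor
  · intro h hm
    rcases List.append_of_mem hm with ⟨s, t, rfl⟩
    exact h ⟨s, t, by simp⟩
  · rintro h ⟨s, t, rfl⟩
    exact h (by simp)

theorem pv_find_spec' {c : Char} {l : List Char} (h : PySem.Chars.find l [c] ≠ -1) :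
    (∀ i < (PySem.Chars.find l [c]).toNat, l[i]? ≠ some c) ∧
      l[(PySem.Chars.find l [c]).toNat]? = some c := by
  have h0 : 0 ≤ PySem.Chars.find l [c] := by
    have := PySem.Chars.neg_one_le_find l [c]
    omega
  obtain ⟨h1, h2⟩ := PySem.Chars.find_spec (s := l) (sub := [c]) h0
  refine ⟨fun i hi hic => h2 i hi ?_, ?_⟩
  · rw [pv_singleton_prefix, List.head?_drop, hic]
  · rw [← List.head?_drop]
    exact pv_singleton_prefix.mp h1

theorem pv_takeWhile_of_first {c : Char} :
    ∀ (l : List Char) (n : Nat), (∀ i < n, l[i]? ≠ some c) → l[n]? = some c →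
      l.takeWhile (pvNe c) = l.take n := by
  intro l
  induction l with
  | nil => intro n _ h; simp at h
  | cons x t ih =>
    intro n hlt hn
    cases n with
    | zero =>
      simp at hn
      rw [List.takeWhile_cons_of_neg (by simp [pvNe, hn])]
      simp
    | succ m =>
      have hx : x ≠ c := by
        have := hlt 0 (by omega)
        simpa using this
      simp at hn
      rw [List.takeWhile_cons_of_pos (by simp [pvNe, hx]), List.take_succ_cons,
        ih m (fun i hi => by have := hlt (i + 1) (by omega); simpa using this) hn]

-- dropping through a '/' at index n preserves the segment after the last '/'
theorem pv_seg_drop {l : List Char} {n : Nat} (h : l[n]? = some '/') :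
    pvSeg (l.drop (n + 1)) = pvSeg l := by
  have hn : n < l.length := by
    by_contra hc
    rw [List.getElem?_eq_none (by omega)] at h
    simp at h
  have hget : l[n] = '/' := by
    have := List.getElem?_eq_getElem hn
    rw [h] at this
    exact (Option.some.injEq _ _).mp this.symm
  have hdecomp : l = l.take n ++ '/' :: l.drop (n + 1) := by
    conv_lhs => rw [← List.take_append_drop n l]
    rw [List.drop_eq_getElem_cons hn, hget]
  conv_rhs => rw [hdecomp]
  unfold pvSeg
  congr 1
  rw [show (l.take n ++ '/' :: l.drop (n + 1)).reverse
      = ((l.drop (n + 1)).reverse ++ ['/']) ++ (l.take n).reverse by simp]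
  rw [pv_takeWhile_mid]

-- B's fold computes the first-dot prefix of the segment after the last '/'
theorem pv_fold_inv (l : List Char) :
    l.foldl pvStepB ([], false) =
      ((pvSeg l).takeWhile (pvNe '.'), decide ('.' ∈ pvSeg l)) := by
  induction l using List.reverseRecOn with
  | nil => simp [pvSeg_nil]
  | append_singleton t c ih =>
    rw [List.foldl_append, List.foldl_cons, List.foldl_nil, ih, pvSeg_append]
    by_cases hc : c = '/'
    · simp [pvStepB, hc]
    · by_cases hd : c = '.'
      · simp only [if_neg hc]
        simp [pvStepB, hd, pv_takeWhile_snoc]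
      · by_cases hm : ('.' : Char) ∈ pvSeg t
        · have hlen := pv_takeWhile_len_ne (c := '.') hm
          simp only [if_neg hc]
          simp [pvStepB, hc, hd, hm, List.takeWhile_append, if_neg hlen]
        · have hall := pv_takeWhile_all (c := '.') hm
          have hd' : ¬('.' : Char) = c := fun e => hd e.symm
          simp only [if_neg hc]
          simp [pvStepB, hc, hd, hd', hm, List.takeWhile_append, hall, pvNe]

-- A's strip loop computes the segment after the last '/'
theorem pv_stripA_eq_seg (l : List Char) : pvStripFoldersA l = pvSeg l := by
  induction l using pvStripFoldersA.induct with
  | case1 l pos h =>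
    rw [pvStripFoldersA]
    split
    · have hnm : '/' ∉ l := pv_find_neg.mp h
      unfold pvSeg
      rw [pv_takeWhile_all (by simpa using hnm)]
      simp
    · next hne => exact absurd h hne
  | case2 l pos h hlt ih =>
    rw [pvStripFoldersA]
    split
    · next heq => exact absurd heq h
    rw [ih]
    have h0 : 0 ≤ pos := by
      have := PySem.Chars.neg_one_le_find l ['/']
      simp only [pos] at *
      omega
    obtain ⟨_, hget⟩ := pv_find_spec' (c := '/') (l := l) h
    rw [PySem.List.slice_from l (by omega : (0:Int) ≤ pos + 1)]
    have htn : (pos + 1).toNat = pos.toNat + 1 := by omega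
    rw [htn]
    exact pv_seg_drop hget

-- A's dot-stripping step is the first-dot prefix
theorem pv_dot_eq_takeWhile (m : List Char) :
    (if PySem.Chars.find m ['.'] ≠ -1
      then PySem.List.slice m none (some (PySem.Chars.find m ['.'])) else m)
    = m.takeWhile (pvNe '.') := by
  by_cases h : PySem.Chars.find m ['.'] = -1
  · rw [if_neg (by simp [h]), pv_takeWhile_all (pv_find_neg.mp h)]
  · have h0 : 0 ≤ PySem.Chars.find m ['.'] := by
      have := PySem.Chars.neg_one_le_find m ['.']
      omega
    obtain ⟨h1, h2⟩ := pv_find_spec' (c := '.') (l := m) h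
    rw [if_pos h, PySem.List.slice_to m h0, pv_takeWhile_of_first m _ h1 h2]

-- ===== VERDICT (by name: the statement is the Claim_ definition above) =====
theorem build_menu_entry_spec : Claim_equal_build_menu_entry := by
  intro index filename _
  unfold Spec_build_menu_entry
  simp only [build_menu_entry, build_menu_entry_alt, pv_fold_inv, pv_stripA_eq_seg,
    pv_dot_eq_takeWhile]
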